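-- pv_equiv track=rewrite | github.com/blippy/pypms | common.py | combine_dict_keys
-- ===== SOURCE A (Python) =====
-- def combine_dict_keys(list_of_dicts):
--     result = set()
--     for dic in list_of_dicts:
--         for key in dic.keys():
--             result.add(key)
--     result = list(result)
--     result.sort()
--     return result
-- ===== SOURCE B (Python) =====
-- def combine_dict_keys(list_of_dicts):
--     keys = []
--     for dic in list_of_dicts:
--         keys.extend(dic)
--     keys.sort()
--     result = []
--     for key in keys:
--         if not result or result[-1] != key:
--             result.append(key)
--     return result
-- ===== Notes on version B (the rewrite author's own statement) =====
-- stated objective: alternative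
-- what changed: Dedup by sorting the flat multiset of keys and skipping adjacent equals in one linear pass, instead of hashing into a set before sorting.
import Mathlib
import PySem

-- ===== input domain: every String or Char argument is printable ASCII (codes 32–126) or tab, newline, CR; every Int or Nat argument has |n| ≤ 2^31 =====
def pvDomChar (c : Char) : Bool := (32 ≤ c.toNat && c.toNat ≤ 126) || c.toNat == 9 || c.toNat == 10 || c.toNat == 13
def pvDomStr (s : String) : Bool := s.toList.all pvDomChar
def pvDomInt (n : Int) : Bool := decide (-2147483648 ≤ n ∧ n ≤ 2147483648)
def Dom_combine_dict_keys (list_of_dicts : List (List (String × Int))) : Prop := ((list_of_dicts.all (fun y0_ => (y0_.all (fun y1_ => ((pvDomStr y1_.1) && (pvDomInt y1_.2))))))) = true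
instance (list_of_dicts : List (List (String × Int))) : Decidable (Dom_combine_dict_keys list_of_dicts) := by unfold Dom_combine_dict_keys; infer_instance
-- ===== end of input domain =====

-- B replaces A's hash-set dedup by sorting the flat key list and skipping adjacent equal
-- keys in one linear pass (alternative decomposition, no set at all).

-- ===== PORT A =====
-- result = set(); for dic: for key in dic.keys(): result.add(key); result = list(result); result.sort()
def combine_dict_keys (list_of_dicts : List (List (String × Int))) : List String :=
  PySem.List.sorted
    (list_of_dicts.foldl
      (fun result dic => (dic.map (fun kv => kv.1)).foldl PySem.Set.add result)
      PySem.Set.empty)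
    (fun x => x) false

-- ===== PORT B =====
-- keys = []; for dic: keys.extend(dic); keys.sort(); then one pass appending key unless result[-1] == key
def combine_dict_keys_alt (list_of_dicts : List (List (String × Int))) : List String :=
  (PySem.List.sorted
      (list_of_dicts.foldl (fun keys dic => keys ++ dic.map (fun kv => kv.1)) [])
      (fun x => x) false).foldl
    (fun result key =>
      if result = [] ∨ result.getLast? ≠ some key then result ++ [key] else result)
    []

-- ===== PRECONDITION & SPEC =====
def Spec_combine_dict_keys (list_of_dicts : List (List (String × Int))) (out : List String) : Prop := out = combine_dict_keys_alt list_of_dicts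
instance (list_of_dicts : List (List (String × Int))) (out : List String) : Decidable (Spec_combine_dict_keys list_of_dicts out) := by unfold Spec_combine_dict_keys; infer_instance

-- ===== CLAIM (what is proved, stated in full; the proofs are below) =====
def Claim_equal_combine_dict_keys : Prop := ∀ (list_of_dicts : List (List (String × Int))), Dom_combine_dict_keys list_of_dicts → Spec_combine_dict_keys list_of_dicts (combine_dict_keys list_of_dicts)

-- ===== LEMMAS AND PROOFS =====

-- membership in the inner 'for key in dic: result.add(key)' fold
theorem addfold_mem (ks : List String) (s : PySem.Set String) (x : String) :
    x ∈ ks.foldl PySem.Set.add s ↔ x ∈ s ∨ x ∈ ks := by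
  induction ks generalizing s with
  | nil => simp
  | cons k t ih =>
    simp [List.foldl_cons, ih, PySem.Set.mem_add, List.mem_cons]
    tauto

theorem addfold_nodup (ks : List String) (s : PySem.Set String) (h : s.Nodup) :
    (ks.foldl PySem.Set.add s).Nodup := by
  induction ks generalizing s with
  | nil => exact h
  | cons k t ih => exact ih _ (PySem.Set.nodup_add s k h)

-- membership in A's whole set-building double loop
theorem setfold_mem (l : List (List (String × Int))) (s : PySem.Set String) (x : String) :
    x ∈ l.foldl (fun result dic => (dic.map (fun kv => kv.1)).foldl PySem.Set.add result) s
      ↔ x ∈ s ∨ ∃ dic ∈ l, x ∈ dic.map (fun kv => kv.1) := by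
  induction l generalizing s with
  | nil => simp
  | cons d t ih =>
    simp only [List.foldl_cons, ih, addfold_mem, List.mem_cons]
    constructor
    · rintro (⟨h | h⟩ | ⟨d', hd', hx⟩)
      · exact Or.inl h
      · exact Or.inr ⟨d, Or.inl rfl, h⟩
      · exact Or.inr ⟨d', Or.inr hd', hx⟩
    · rintro (h | ⟨d', (rfl | hd'), hx⟩)
      · exact Or.inl (Or.inl h)
      · exact Or.inl (Or.inr hx)
      · exact Or.inr ⟨d', hd', hx⟩

theorem setfold_nodup (l : List (List (String × Int))) (s : PySem.Set String) (h : s.Nodup) :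
    (l.foldl (fun result dic => (dic.map (fun kv => kv.1)).foldl PySem.Set.add result) s).Nodup := by
  induction l generalizing s with
  | nil => exact h
  | cons d t ih => exact ih _ (addfold_nodup _ _ h)

-- the last element of a (· ≤ ·)-sorted list bounds every element
theorem last_max (acc : List String) (h : acc.Pairwise (· ≤ ·)) (a : String) (ha : a ∈ acc)
    (g : String) (hg : acc.getLast? = some g) : a ≤ g := by
  obtain ⟨ys, rfl⟩ := List.getLast?_eq_some_iff.mp hg
  rcases List.mem_append.mp ha with hy | hy
  · exact (List.pairwise_append.mp h).2.2 a hy g (by simp)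
  · simp at hy; exact le_of_eq hy

-- the adjacent-dedup pass of B: invariant over the fold
theorem dedup_fold (s : List String) (acc : List String)
    (hs : s.Pairwise (· ≤ ·)) (hacc : acc.Pairwise (· < ·))
    (hle : ∀ x ∈ s, ∀ a ∈ acc, a ≤ x) :
    (s.foldl (fun result key =>
        if result = [] ∨ result.getLast? ≠ some key then result ++ [key] else result) acc).Pairwise (· < ·)
      ∧ ∀ x, x ∈ s.foldl (fun result key =>
        if result = [] ∨ result.getLast? ≠ some key then result ++ [key] else result) acc
          ↔ x ∈ acc ∨ x ∈ s := by
  induction s generalizing acc with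
  | nil => exact ⟨hacc, by simp⟩
  | cons k t ih =>
    rcases List.pairwise_cons.mp hs with ⟨hk, ht⟩
    rw [List.foldl_cons]
    by_cases hc : acc = [] ∨ acc.getLast? ≠ some k
    · rw [if_pos hc]
      have hlt : ∀ a ∈ acc, a < k := by
        intro a ha
        have hak : a ≤ k := hle k (by simp) a ha
        rcases hc with rfl | hne
        · cases ha
        · refine lt_of_le_of_ne hak ?_
          rintro rfl
          obtain ⟨g, hg⟩ := Option.isSome_iff_exists.mp (List.getLast?_isSome.mpr (List.ne_nil_of_mem ha))
          exact hne (by rw [hg, le_antisymm (hle a (by simp) g (List.mem_of_getLast? hg))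
            (last_max acc (hacc.imp le_of_lt) a ha g hg)])
      have hacc' : (acc ++ [k]).Pairwise (· < ·) := by
        rw [List.pairwise_append]
        exact ⟨hacc, by simp, by intro a ha b hb; simp at hb; subst hb; exact hlt a ha⟩
      have hle' : ∀ x ∈ t, ∀ a ∈ acc ++ [k], a ≤ x := by
        intro x hx a ha
        rcases List.mem_append.mp ha with ha' | ha'
        · exact hle x (by simp [hx]) a ha'
        · simp at ha'; subst ha'; exact hk x hx
      rcases ih (acc ++ [k]) ht hacc' hle' with ⟨h1, h2⟩
      refine ⟨h1, fun x => ?_⟩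
      rw [h2 x]
      simp [List.mem_append, List.mem_cons]
      tauto
    · rw [if_neg hc]
      push Not at hc
      have hkacc : k ∈ acc := List.mem_of_getLast? hc.2
      have hle' : ∀ x ∈ t, ∀ a ∈ acc, a ≤ x := fun x hx a ha => hle x (by simp [hx]) a ha
      rcases ih acc ht hacc hle' with ⟨h1, h2⟩
      refine ⟨h1, fun x => ?_⟩
      rw [h2 x]
      simp [List.mem_cons]
      constructor
      · rintro (h | h)
        · exact Or.inl h
        · exact Or.inr (Or.inr h)
      · rintro (h | rfl | h)
        · exact Or.inl h
        · exact Or.inl hkacc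
        · exact Or.inr h

-- ===== VERDICT (by name: the statement is the Claim_ definition above) =====
theorem combine_dict_keys_spec : Claim_equal_combine_dict_keys := by
  intro l _
  unfold Spec_combine_dict_keys combine_dict_keys combine_dict_keys_alt
  -- names for both sides
  set S := l.foldl (fun result dic => (dic.map (fun kv => kv.1)).foldl PySem.Set.add result)
      PySem.Set.empty with hS
  set F := l.foldl (fun keys dic => keys ++ dic.map (fun kv => kv.1)) [] with hF
  have hSmem : ∀ x, x ∈ S ↔ ∃ dic ∈ l, x ∈ dic.map (fun kv => kv.1) := by
    intro x; rw [hS, setfold_mem]; simp [PySem.Set.empty]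
  have hFmem : ∀ x, x ∈ F ↔ ∃ dic ∈ l, x ∈ dic.map (fun kv => kv.1) := by
    intro x
    rw [hF, PySem.List.foldl_append_eq_flatMap]
    simp [List.mem_flatMap]
  have hsortF : (PySem.List.sorted F (fun x => x) false).Pairwise (· ≤ ·) :=
    PySem.List.sorted_pairwise F (fun x => x)
  rcases dedup_fold (PySem.List.sorted F (fun x => x) false) [] hsortF (by simp) (by simp)
    with ⟨hBpw, hBmem⟩
  have hA_pw : (PySem.List.sorted S (fun x => x) false).Pairwise (· ≤ ·) :=
    PySem.List.sorted_pairwise S (fun x => x)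
  have hA_nodup : (PySem.List.sorted S (fun x => x) false).Nodup :=
    (PySem.List.sorted_perm S (fun x => x) false).nodup_iff.mpr
      (setfold_nodup l PySem.Set.empty (by simp [PySem.Set.empty]))
  have hB_nodup := hBpw.imp (fun h => ne_of_lt h)
  have hmem : ∀ x, x ∈ PySem.List.sorted S (fun x => x) false ↔
      x ∈ (PySem.List.sorted F (fun x => x) false).foldl (fun result key =>
        if result = [] ∨ result.getLast? ≠ some key then result ++ [key] else result) [] := by
    intro x
    rw [(PySem.List.sorted_perm S (fun x => x) false).mem_iff, hSmem, hBmem]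
    simp [(PySem.List.sorted_perm F (fun x => x) false).mem_iff, hFmem]
  exact List.Perm.eq_of_pairwise
    (le := (· ≤ ·)) (fun a b _ _ h1 h2 => le_antisymm h1 h2)
    hA_pw (hBpw.imp le_of_lt)
    ((List.perm_ext_iff_of_nodup hA_nodup hB_nodup).mpr hmem)
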